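-- pv_equiv track=rewrite | github.com/Nit17/DSA---Python | DSA/suffix_array.py | substring_search
-- ===== SOURCE A (Python) =====
-- from typing import List
--
-- def substring_search(s: str, sa: List[int], pattern: str) -> int:
--     """Search pattern using suffix array and return the minimal index in s.
--
--     Finds any matching suffix via binary search (comparing prefixes), then
--     scans adjacent suffixes with the same prefix to compute the minimal
--     starting index among all matches. Returns -1 if not found.
--     """
--     n = len(s)
--     m = len(pattern)
--     if m == 0:
--         return 0
--     lo, hi = 0, n - 1
--     hit = -1
--     while lo <= hi:
--         mid = (lo + hi) // 2
--         start = sa[mid]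
--         seg = s[start:start + m]
--         if seg == pattern:
--             hit = mid
--             break
--         elif seg < pattern:
--             lo = mid + 1
--         else:
--             hi = mid - 1
--     if hit == -1:
--         return -1
--     # Expand to collect all contiguous matches around 'hit'
--     best = sa[hit]
--     i = hit - 1
--     while i >= 0 and s[sa[i]:sa[i] + m] == pattern:
--         if sa[i] < best:
--             best = sa[i]
--         i -= 1
--     i = hit + 1
--     while i < n and s[sa[i]:sa[i] + m] == pattern:
--         if sa[i] < best:
--             best = sa[i]
--         i += 1
--     return best
-- ===== SOURCE B (Python) =====
-- def substring_search(s, sa, pattern):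
--     """Suffix-array search for the minimal match index: binary-search the
--     lower and upper bounds of the match range, then take min(sa[lo:hi])."""
--     if not pattern:
--         return 0
--     n = len(s)
--     m = len(pattern)
--     lo, hi = 0, n
--     while lo < hi:
--         mid = (lo + hi) // 2
--         if s[sa[mid]:sa[mid] + m] < pattern:
--             lo = mid + 1
--         else:
--             hi = mid
--     left = lo
--     hi = n
--     while lo < hi:
--         mid = (lo + hi) // 2
--         if s[sa[mid]:sa[mid] + m] <= pattern:
--             lo = mid + 1
--         else:
--             hi = mid
--     if left == lo:
--         return -1
--     return min(sa[left:lo])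
-- ===== Notes on version B (the rewrite author's own statement) =====
-- stated objective: alternative
-- what changed: A binary-searches for any one match and then scans the neighbouring suffix-array entries comparing an m-character prefix at each step; B instead binary-searches the lower and upper bounds of the whole match range and takes min() of that slice of sa, so the range scan does no per-element O(m) string comparisons.
-- outside the precondition, e.g. on substring_search('ba', [0], 'a'): A returns -1, B raises IndexError; on substring_search('ab', [1, 0], 'a'): A returns -1, B returns 0; on substring_search('aa', [-2, -1], 'a'): A returns -2, B returns -1
import Mathlib
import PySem

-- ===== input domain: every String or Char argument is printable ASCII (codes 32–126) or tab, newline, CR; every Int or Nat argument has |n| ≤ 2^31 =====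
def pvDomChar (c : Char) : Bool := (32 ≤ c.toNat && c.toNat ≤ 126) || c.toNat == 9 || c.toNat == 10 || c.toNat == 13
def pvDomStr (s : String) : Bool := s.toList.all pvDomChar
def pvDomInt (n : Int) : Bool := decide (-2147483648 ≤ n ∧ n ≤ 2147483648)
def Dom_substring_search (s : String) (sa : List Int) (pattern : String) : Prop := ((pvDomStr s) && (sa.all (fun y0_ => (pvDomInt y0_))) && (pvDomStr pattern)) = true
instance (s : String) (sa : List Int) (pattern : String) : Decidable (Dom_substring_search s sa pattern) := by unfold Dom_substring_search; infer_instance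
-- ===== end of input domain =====

-- B replaces A's find-one-match-then-linear-expand search by two bound-finding binary
-- searches (lower and upper bound of the match range) followed by min() of that slice.

-- ===== PORT A =====
-- A's binary search: returns the index 'hit' (A's sentinel -1 = not found / loop exhausted)
def aBin (cs : List Char) (sa : List Int) (p : List Char) (m : Int) (lo hi : Int) : Int :=
  -- mid = (lo+hi)//2, start = sa[mid], seg = s[start:start+m], written inline
  if h : lo ≤ hi then
    if PySem.List.slice cs (some (PySem.List.pyGetD sa (PySem.Int.floordiv (lo + hi) 2) 0))
        (some (PySem.List.pyGetD sa (PySem.Int.floordiv (lo + hi) 2) 0 + m)) = p then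
      PySem.Int.floordiv (lo + hi) 2
    else if PySem.List.slice cs (some (PySem.List.pyGetD sa (PySem.Int.floordiv (lo + hi) 2) 0))
        (some (PySem.List.pyGetD sa (PySem.Int.floordiv (lo + hi) 2) 0 + m)) < p then
      aBin cs sa p m (PySem.Int.floordiv (lo + hi) 2 + 1) hi
    else aBin cs sa p m lo (PySem.Int.floordiv (lo + hi) 2 - 1)
  else -1
termination_by (hi + 1 - lo).toNat
decreasing_by
  · have hb := PySem.Int.floordiv_two_mid_bounds h; omega
  · have hb := PySem.Int.floordiv_two_mid_bounds h; omega

-- A's downward expansion loop (while i >= 0 and s[sa[i]:sa[i]+m] == pattern)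
def aDown (cs : List Char) (sa : List Int) (p : List Char) (m : Int) (i best : Int) : Int :=
  if h : 0 ≤ i ∧ PySem.List.slice cs (some (PySem.List.pyGetD sa i 0)) (some (PySem.List.pyGetD sa i 0 + m)) = p then
    aDown cs sa p m (i - 1)
      (if PySem.List.pyGetD sa i 0 < best then PySem.List.pyGetD sa i 0 else best)
  else best
termination_by (i + 1).toNat
decreasing_by have := h.1; omega

-- A's upward expansion loop (while i < n and s[sa[i]:sa[i]+m] == pattern)
def aUp (cs : List Char) (sa : List Int) (p : List Char) (m n : Int) (i best : Int) : Int :=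
  if h : i < n ∧ PySem.List.slice cs (some (PySem.List.pyGetD sa i 0)) (some (PySem.List.pyGetD sa i 0 + m)) = p then
    aUp cs sa p m n (i + 1)
      (if PySem.List.pyGetD sa i 0 < best then PySem.List.pyGetD sa i 0 else best)
  else best
termination_by (n - i).toNat
decreasing_by have := h.1; omega

def substring_search (s : String) (sa : List Int) (pattern : String) : Int :=
  let cs := s.toList
  let p := pattern.toList
  let n : Int := cs.length
  let m : Int := p.length
  if m = 0 then 0
  else
    let hit := aBin cs sa p m 0 (n - 1)
    if hit = -1 then -1
    else
      let best := PySem.List.pyGetD sa hit 0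
      aUp cs sa p m n (hit + 1) (aDown cs sa p m (hit - 1) best)

-- ===== PORT B =====
-- B's lower-bound search: first index whose m-prefix is >= pattern
def bLow (cs : List Char) (sa : List Int) (p : List Char) (m : Int) (lo hi : Int) : Int :=
  -- mid = (lo+hi)//2, start = sa[mid], written inline
  if h : lo < hi then
    if PySem.List.slice cs (some (PySem.List.pyGetD sa (PySem.Int.floordiv (lo + hi) 2) 0))
        (some (PySem.List.pyGetD sa (PySem.Int.floordiv (lo + hi) 2) 0 + m)) < p then
      bLow cs sa p m (PySem.Int.floordiv (lo + hi) 2 + 1) hi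
    else bLow cs sa p m lo (PySem.Int.floordiv (lo + hi) 2)
  else lo
termination_by (hi - lo).toNat
decreasing_by
  · have hb := PySem.Int.floordiv_two_mid_bounds (le_of_lt h); omega
  · have hb := PySem.Int.floordiv_two_mid_bounds (le_of_lt h)
    have hlt : PySem.Int.floordiv (lo + hi) 2 < hi :=
      (PySem.Int.floordiv_lt_iff_lt_mul (by norm_num)).2 (by omega)
    omega

-- B's upper-bound search: first index whose m-prefix is > pattern
def bHigh (cs : List Char) (sa : List Int) (p : List Char) (m : Int) (lo hi : Int) : Int :=
  -- mid = (lo+hi)//2, start = sa[mid], written inline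
  if h : lo < hi then
    if PySem.List.slice cs (some (PySem.List.pyGetD sa (PySem.Int.floordiv (lo + hi) 2) 0))
        (some (PySem.List.pyGetD sa (PySem.Int.floordiv (lo + hi) 2) 0 + m)) ≤ p then
      bHigh cs sa p m (PySem.Int.floordiv (lo + hi) 2 + 1) hi
    else bHigh cs sa p m lo (PySem.Int.floordiv (lo + hi) 2)
  else lo
termination_by (hi - lo).toNat
decreasing_by
  · have hb := PySem.Int.floordiv_two_mid_bounds (le_of_lt h); omega
  · have hb := PySem.Int.floordiv_two_mid_bounds (le_of_lt h)
    have hlt : PySem.Int.floordiv (lo + hi) 2 < hi :=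
      (PySem.Int.floordiv_lt_iff_lt_mul (by norm_num)).2 (by omega)
    omega

def substring_search_alt (s : String) (sa : List Int) (pattern : String) : Int :=
  let cs := s.toList
  let p := pattern.toList
  if p.length = 0 then 0
  else
    let n : Int := cs.length
    let m : Int := p.length
    let left := bLow cs sa p m 0 n
    let right := bHigh cs sa p m left n
    if left = right then -1
    else (PySem.List.min? (PySem.List.slice sa (some left) (some right)) (fun x => x)).getD 0

-- ===== PRECONDITION & SPEC =====
-- Pre_ is the contract both searches rely on: sa has an entry for every character of s and
-- the m-character windows s[k:k+m] named by its first len(s) entries are in sorted order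
-- (trivially true for an empty pattern, where neither program touches sa).  It excludes
-- inputs where A's binary search may raise IndexError (len(sa) < len(s)) and inputs with
-- unsorted windows, on which A's returned value is an accident of its search path.
def Pre_substring_search (s : String) (sa : List Int) (pattern : String) : Prop :=
  pattern.toList.length = 0 ∨
    (s.toList.length ≤ sa.length ∧
      List.Pairwise (fun u v => u ≤ v)
        ((sa.take s.toList.length).map
          (fun k => PySem.List.slice s.toList (some k) (some (k + (pattern.toList.length : Int))))))
instance (s : String) (sa : List Int) (pattern : String) : Decidable (Pre_substring_search s sa pattern) := by unfold Pre_substring_search; infer_instance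

def pvWitness_substring_search : String × List Int × String := ("ab", [0, 1], "b")

def Spec_substring_search (s : String) (sa : List Int) (pattern : String) (out : Int) : Prop := out = substring_search_alt s sa pattern
instance (s : String) (sa : List Int) (pattern : String) (out : Int) : Decidable (Spec_substring_search s sa pattern out) := by unfold Spec_substring_search; infer_instance

-- ===== CLAIM (what is proved, stated in full; the proofs are below) =====
def Claim_equal_substring_search : Prop := ∀ (s : String) (sa : List Int) (pattern : String), Dom_substring_search s sa pattern → Pre_substring_search s sa pattern → Spec_substring_search s sa pattern (substring_search s sa pattern)

-- ===== LEMMAS AND PROOFS =====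

-- the m-character window of s at position sa[i], as both ports compute it
def pvSeg (cs : List Char) (sa : List Int) (m i : Int) : List Char :=
  PySem.List.slice cs (some (PySem.List.pyGetD sa i 0)) (some (PySem.List.pyGetD sa i 0 + m))

theorem pvSeg_def (cs : List Char) (sa : List Int) (m i : Int) :
    PySem.List.slice cs (some (PySem.List.pyGetD sa i 0))
      (some (PySem.List.pyGetD sa i 0 + m)) = pvSeg cs sa m i := rfl

theorem pvSeg_mono (cs : List Char) (sa : List Int) (m : Int)
    (hlen : cs.length ≤ sa.length)
    (hsort : List.Pairwise (fun u v => u ≤ v)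
      ((sa.take cs.length).map (fun k => PySem.List.slice cs (some k) (some (k + m)))))
    {i j : Int} (h0 : 0 ≤ i) (hij : i ≤ j) (hj : j < (cs.length : Int)) :
    pvSeg cs sa m i ≤ pvSeg cs sa m j := by
  have h0j : 0 ≤ j := le_trans h0 hij
  have hgi := PySem.List.pyGetD_eq_getElem sa (0 : Int) h0 (by exact_mod_cast by omega)
  have hgj := PySem.List.pyGetD_eq_getElem sa (0 : Int) h0j (by exact_mod_cast by omega)
  unfold pvSeg
  rw [hgi, hgj]
  rw [List.pairwise_map] at hsort
  rcases lt_or_eq_of_le hij with hlt | heq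
  · have hp := (List.pairwise_iff_getElem.1 hsort) i.toNat j.toNat
      (by simp [List.length_take]; omega) (by simp [List.length_take]; omega) (by omega)
    simpa [List.getElem_take] using hp
  · subst heq
    exact le_refl _

theorem foldl_min_out (l : List Int) (a b : Int) :
    l.foldl min (min a b) = min a (l.foldl min b) := by
  induction l generalizing b with
  | nil => rfl
  | cons x l ih =>
    simp only [List.foldl_cons]
    rw [min_assoc]
    exact ih (min b x)

theorem foldl_min_mem (l : List Int) (b : Int) : l.foldl min b = b ∨ l.foldl min b ∈ l := by
  induction l generalizing b with
  | nil => left; rfl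
  | cons x l ih =>
    simp only [List.foldl_cons]
    rcases ih (min b x) with h | h
    · rw [h]; rcases le_total b x with h2 | h2
      · left; simp [min_eq_left h2]
      · right; simp [min_eq_right h2]
    · right; exact List.mem_cons_of_mem _ h

theorem foldl_min_le (l : List Int) (b : Int) :
    l.foldl min b ≤ b ∧ ∀ y ∈ l, l.foldl min b ≤ y := by
  induction l generalizing b with
  | nil => exact ⟨le_refl _, by simp⟩
  | cons x l ih =>
    simp only [List.foldl_cons]
    obtain ⟨h1, h2⟩ := ih (min b x)
    refine ⟨le_trans h1 (min_le_left _ _), ?_⟩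
    intro y hy
    rcases List.mem_cons.1 hy with rfl | hy
    · exact le_trans h1 (min_le_right _ _)
    · exact h2 y hy

theorem slice_decomp (sa : List Int) (left h right : Int)
    (h0 : 0 ≤ left) (h1 : left ≤ h) (h2 : h < right) (h3 : right ≤ (sa.length : Int)) :
    PySem.List.slice sa (some left) (some right) =
      PySem.List.slice sa (some left) (some h) ++
        PySem.List.pyGetD sa h 0 :: PySem.List.slice sa (some (h + 1)) (some right) := by
  have hh : h < (sa.length : Int) := lt_of_lt_of_le h2 h3
  rw [PySem.List.slice_toNat sa h0 (by omega), PySem.List.slice_toNat sa h0 (by omega),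
    PySem.List.slice_toNat sa (by omega : (0:Int) ≤ h + 1) (by omega),
    PySem.List.pyGetD_eq_getElem sa 0 (by omega) hh]
  have e1 : right.toNat - left.toNat = (h.toNat - left.toNat) + (right.toNat - h.toNat) := by omega
  rw [e1, List.take_add, List.drop_drop]
  have e2 : left.toNat + (h.toNat - left.toNat) = h.toNat := by omega
  rw [e2, List.drop_eq_getElem_cons (by omega : h.toNat < sa.length)]
  have e3 : right.toNat - h.toNat = (right.toNat - (h + 1).toNat) + 1 := by omega
  have e4 : (h + 1).toNat = h.toNat + 1 := by omega
  rw [e3, List.take_succ_cons, e4]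

theorem bLow_spec (cs p : List Char) (sa : List Int) (m N : Int)
    (hmono : ∀ {i j : Int}, 0 ≤ i → i ≤ j → j < N → pvSeg cs sa m i ≤ pvSeg cs sa m j)
    (lo hi : Int) (hlo : 0 ≤ lo) (hlh : lo ≤ hi) (hhi : hi ≤ N)
    (hbelow : ∀ k, 0 ≤ k → k < lo → pvSeg cs sa m k < p)
    (habove : ∀ k, hi ≤ k → k < N → ¬ pvSeg cs sa m k < p) :
    (lo ≤ bLow cs sa p m lo hi ∧ bLow cs sa p m lo hi ≤ hi) ∧
      (∀ k, 0 ≤ k → k < bLow cs sa p m lo hi → pvSeg cs sa m k < p) ∧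
      (∀ k, bLow cs sa p m lo hi ≤ k → k < N → ¬ pvSeg cs sa m k < p) := by
  rw [bLow]
  split
  · rename_i h
    have hmb := PySem.Int.floordiv_two_mid_bounds (le_of_lt h)
    have hmlt : PySem.Int.floordiv (lo + hi) 2 < hi :=
      (PySem.Int.floordiv_lt_iff_lt_mul (by norm_num)).2 (by omega)
    set mid := PySem.Int.floordiv (lo + hi) 2 with hmiddef
    simp only [pvSeg_def]
    split
    · rename_i hseg
      have hrec := bLow_spec cs p sa m N hmono (mid + 1) hi (by omega) (by omega) hhi
        (fun k hk hk2 => lt_of_le_of_lt (hmono hk (by omega) (by omega)) hseg) habove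
      exact ⟨⟨by omega, hrec.1.2⟩, hrec.2.1, hrec.2.2⟩
    · rename_i hseg
      have hrec := bLow_spec cs p sa m N hmono lo mid hlo (by omega) (by omega) hbelow
        (fun k hk hk2 contra => hseg (lt_of_le_of_lt (hmono (by omega) hk hk2) contra))
      exact ⟨⟨hrec.1.1, by omega⟩, hrec.2.1, hrec.2.2⟩
  · rename_i h
    have heq : lo = hi := le_antisymm hlh (not_lt.1 h)
    subst heq
    exact ⟨⟨le_refl _, le_refl _⟩, hbelow, habove⟩
termination_by (hi - lo).toNat
decreasing_by all_goals omega

theorem bHigh_spec (cs p : List Char) (sa : List Int) (m N : Int)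
    (hmono : ∀ {i j : Int}, 0 ≤ i → i ≤ j → j < N → pvSeg cs sa m i ≤ pvSeg cs sa m j)
    (lo hi : Int) (hlo : 0 ≤ lo) (hlh : lo ≤ hi) (hhi : hi ≤ N)
    (hbelow : ∀ k, 0 ≤ k → k < lo → pvSeg cs sa m k ≤ p)
    (habove : ∀ k, hi ≤ k → k < N → ¬ pvSeg cs sa m k ≤ p) :
    (lo ≤ bHigh cs sa p m lo hi ∧ bHigh cs sa p m lo hi ≤ hi) ∧
      (∀ k, 0 ≤ k → k < bHigh cs sa p m lo hi → pvSeg cs sa m k ≤ p) ∧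
      (∀ k, bHigh cs sa p m lo hi ≤ k → k < N → ¬ pvSeg cs sa m k ≤ p) := by
  rw [bHigh]
  split
  · rename_i h
    have hmb := PySem.Int.floordiv_two_mid_bounds (le_of_lt h)
    have hmlt : PySem.Int.floordiv (lo + hi) 2 < hi :=
      (PySem.Int.floordiv_lt_iff_lt_mul (by norm_num)).2 (by omega)
    set mid := PySem.Int.floordiv (lo + hi) 2 with hmiddef
    simp only [pvSeg_def]
    split
    · rename_i hseg
      have hrec := bHigh_spec cs p sa m N hmono (mid + 1) hi (by omega) (by omega) hhi
        (fun k hk hk2 => le_trans (hmono hk (by omega) (by omega)) hseg) habove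
      exact ⟨⟨by omega, hrec.1.2⟩, hrec.2.1, hrec.2.2⟩
    · rename_i hseg
      have hrec := bHigh_spec cs p sa m N hmono lo mid hlo (by omega) (by omega) hbelow
        (fun k hk hk2 contra => hseg (le_trans (hmono (by omega) hk hk2) contra))
      exact ⟨⟨hrec.1.1, by omega⟩, hrec.2.1, hrec.2.2⟩
  · rename_i h
    have heq : lo = hi := le_antisymm hlh (not_lt.1 h)
    subst heq
    exact ⟨⟨le_refl _, le_refl _⟩, hbelow, habove⟩
termination_by (hi - lo).toNat
decreasing_by all_goals omega

theorem aBin_spec (cs p : List Char) (sa : List Int) (m N : Int)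
    (hmono : ∀ {i j : Int}, 0 ≤ i → i ≤ j → j < N → pvSeg cs sa m i ≤ pvSeg cs sa m j)
    (lo hi : Int) (hlo : 0 ≤ lo) (hhi : hi < N)
    (hinv : ∀ k, 0 ≤ k → k < N → pvSeg cs sa m k = p → lo ≤ k ∧ k ≤ hi) :
    (aBin cs sa p m lo hi = -1 ∧ ∀ k, 0 ≤ k → k < N → pvSeg cs sa m k ≠ p) ∨
      (0 ≤ aBin cs sa p m lo hi ∧ aBin cs sa p m lo hi < N ∧
        pvSeg cs sa m (aBin cs sa p m lo hi) = p) := by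
  rw [aBin]
  split
  · rename_i h
    have hmb := PySem.Int.floordiv_two_mid_bounds h
    set mid := PySem.Int.floordiv (lo + hi) 2 with hmiddef
    simp only [pvSeg_def]
    split
    · rename_i hseg
      exact Or.inr ⟨by omega, by omega, hseg⟩
    · rename_i hne
      split
      · rename_i hseg
        exact aBin_spec cs p sa m N hmono (mid + 1) hi (by omega) hhi
          (fun k hk hkN hkp => by
            have hk2 := hinv k hk hkN hkp
            refine ⟨?_, hk2.2⟩
            by_contra hcon
            have hkm : k ≤ mid := by omega
            have hlt := lt_of_le_of_lt (hmono hk hkm (by omega)) hseg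
            rw [hkp] at hlt
            exact absurd hlt (lt_irrefl p))
      · rename_i hseg
        have hgt : p < pvSeg cs sa m mid := by
          rcases lt_trichotomy (pvSeg cs sa m mid) p with h1 | h1 | h1
          · exact absurd h1 hseg
          · exact absurd h1 hne
          · exact h1
        exact aBin_spec cs p sa m N hmono lo (mid - 1) hlo (by omega)
          (fun k hk hkN hkp => by
            have hk2 := hinv k hk hkN hkp
            refine ⟨hk2.1, ?_⟩
            by_contra hcon
            have hmk : mid ≤ k := by omega
            have hlt := lt_of_lt_of_le hgt (hmono (by omega) hmk hkN)
            rw [hkp] at hlt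
            exact absurd hlt (lt_irrefl p))
  · rename_i h
    refine Or.inl ⟨rfl, fun k hk hkN hkp => ?_⟩
    have := hinv k hk hkN hkp
    omega
termination_by (hi + 1 - lo).toNat
decreasing_by all_goals omega

theorem aDown_spec (cs p : List Char) (sa : List Int) (m left right N : Int)
    (h0 : 0 ≤ left) (hr : right ≤ N) (hNle : N ≤ (sa.length : Int))
    (hiff : ∀ k, 0 ≤ k → k < N → (pvSeg cs sa m k = p ↔ (left ≤ k ∧ k < right)))
    (i best : Int) (hi : i < right) (him : -1 ≤ i) :
    aDown cs sa p m i best =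
      (PySem.List.slice sa (some left) (some (i + 1))).foldl min best := by
  rw [aDown]
  split
  · rename_i h
    have hp : pvSeg cs sa m i = p := by rw [← pvSeg_def]; exact h.2
    have hiN : i < N := lt_of_lt_of_le hi hr
    have hk := (hiff i h.1 hiN).1 hp
    have h0i : 0 ≤ i := h.1
    rw [aDown_spec cs p sa m left right N h0 hr hNle hiff (i - 1) _ (by omega) (by omega)]
    have e : i - 1 + 1 = i := by omega
    rw [e]
    have hdec := slice_decomp sa left i (i + 1) h0 hk.1 (by omega) (by omega)
    have hemp : PySem.List.slice sa (some (i + 1)) (some (i + 1)) = [] := by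
      rw [PySem.List.slice_toNat sa (by omega) (by omega)]
      simp
    rw [hdec, hemp, List.foldl_append]
    have hmin : (if PySem.List.pyGetD sa i 0 < best then PySem.List.pyGetD sa i 0 else best) =
        min (PySem.List.pyGetD sa i 0) best := by
      split
      · rename_i hc; exact (min_eq_left (le_of_lt hc)).symm
      · rename_i hc; exact (min_eq_right (not_lt.1 hc)).symm
    rw [hmin, foldl_min_out]
    simp only [List.foldl_cons, List.foldl_nil]
    exact min_comm _ _
  · rename_i h
    have hil : i < left := by
      by_contra hcon
      rw [not_lt] at hcon
      have hiN : i < N := lt_of_lt_of_le hi hr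
      have h0i : 0 ≤ i := le_trans h0 hcon
      exact h ⟨h0i, by rw [pvSeg_def]; exact (hiff i h0i hiN).2 ⟨hcon, hi⟩⟩
    have hempty : PySem.List.slice sa (some left) (some (i + 1)) = [] := by
      rw [PySem.List.slice_toNat sa h0 (by omega)]
      have e : (i + 1).toNat - left.toNat = 0 := by omega
      rw [e]
      simp
    rw [hempty]
    rfl
termination_by (i + 1).toNat
decreasing_by omega

theorem aUp_spec (cs p : List Char) (sa : List Int) (m left right N n : Int)
    (h0 : 0 ≤ left) (hlr : left ≤ right) (hr : right ≤ N) (hNle : N ≤ (sa.length : Int)) (hn : n = N)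
    (hiff : ∀ k, 0 ≤ k → k < N → (pvSeg cs sa m k = p ↔ (left ≤ k ∧ k < right)))
    (i best : Int) (hi : left ≤ i) :
    aUp cs sa p m n i best =
      (PySem.List.slice sa (some i) (some right)).foldl min best := by
  rw [aUp]
  split
  · rename_i h
    have hp : pvSeg cs sa m i = p := by rw [← pvSeg_def]; exact h.2
    have h0i : 0 ≤ i := le_trans h0 hi
    have hiN : i < N := by omega
    have hk := (hiff i h0i hiN).1 hp
    rw [aUp_spec cs p sa m left right N n h0 hlr hr hNle hn hiff (i + 1) _ (by omega)]
    have hdec := slice_decomp sa i i right h0i (le_refl i) hk.2 (by omega)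
    have hemp : PySem.List.slice sa (some i) (some i) = [] := by
      rw [PySem.List.slice_toNat sa (by omega) (by omega)]
      simp
    rw [hdec, hemp, List.nil_append]
    have hmin : (if PySem.List.pyGetD sa i 0 < best then PySem.List.pyGetD sa i 0 else best) =
        min (PySem.List.pyGetD sa i 0) best := by
      split
      · rename_i hc; exact (min_eq_left (le_of_lt hc)).symm
      · rename_i hc; exact (min_eq_right (not_lt.1 hc)).symm
    rw [hmin]
    simp only [List.foldl_cons]
    rw [min_comm]
  · rename_i h
    have hri : right ≤ i := by
      by_contra hcon
      rw [not_le] at hcon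
      have h0i : 0 ≤ i := le_trans h0 hi
      have hiN : i < N := lt_of_lt_of_le hcon hr
      exact h ⟨by omega, by rw [pvSeg_def]; exact (hiff i h0i hiN).2 ⟨hi, hcon⟩⟩
    have hempty : PySem.List.slice sa (some i) (some right) = [] := by
      rw [PySem.List.slice_toNat sa (by omega) (by omega)]
      have e : right.toNat - i.toNat = 0 := by omega
      rw [e]
      simp
    rw [hempty]
    rfl
termination_by (n - i).toNat
decreasing_by omega

-- ===== VERDICT (by name: the statement is the Claim_ definition above) =====
theorem substring_search_spec : Claim_equal_substring_search := by
  intro s sa pattern hdom hpre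
  unfold Spec_substring_search substring_search substring_search_alt
  simp only []
  set cs := s.toList with hcs
  set p := pattern.toList with hpdef
  by_cases hm0 : p.length = 0
  · simp [hm0]
  · rcases hpre with hpe | ⟨hlen, hsort⟩
    · exact absurd hpe hm0
    have hm0' : ¬ ((p.length : Int) = 0) := by exact_mod_cast hm0
    rw [if_neg hm0', if_neg hm0]
    set m : Int := (p.length : Int) with hmdef
    set N : Int := (cs.length : Int) with hNdef
    have hm : 0 ≤ m := by positivity
    have hN0 : 0 ≤ N := by positivity
    have hNle : N ≤ (sa.length : Int) := by
      show ((s.toList.length : Int)) ≤ (sa.length : Int)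
      exact_mod_cast hlen
    have hmono : ∀ {i j : Int}, 0 ≤ i → i ≤ j → j < N → pvSeg cs sa m i ≤ pvSeg cs sa m j :=
      fun h0 hij hj => pvSeg_mono cs sa m hlen hsort h0 hij hj
    have hbl := bLow_spec cs p sa m N hmono 0 N (le_refl 0) hN0 (le_refl N)
      (fun k hk hk2 => absurd hk (by omega)) (fun k hk hk2 => absurd hk2 (by omega))
    set L := bLow cs sa p m 0 N with hLdef
    have hbh := bHigh_spec cs p sa m N hmono L N hbl.1.1 hbl.1.2 (le_refl N)
      (fun k hk hk2 => le_of_lt (hbl.2.1 k hk hk2))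
      (fun k hk hk2 => absurd hk2 (by omega))
    set R := bHigh cs sa p m L N with hRdef
    have hiff : ∀ k, 0 ≤ k → k < N → (pvSeg cs sa m k = p ↔ (L ≤ k ∧ k < R)) := by
      intro k hk hkN
      constructor
      · intro hkp
        constructor
        · by_contra hcon
          rw [not_le] at hcon
          have := hbl.2.1 k hk hcon
          rw [hkp] at this
          exact absurd this (lt_irrefl p)
        · by_contra hcon
          rw [not_lt] at hcon
          exact hbh.2.2 k hcon hkN (le_of_eq hkp)
      · rintro ⟨hL, hR⟩
        exact le_antisymm (hbh.2.1 k hk hR) (not_lt.1 (hbl.2.2 k hL hkN))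
    have habin := aBin_spec cs p sa m N hmono 0 (N - 1) (le_refl 0) (by omega)
      (fun k hk hkN hkp => ⟨hk, by omega⟩)
    rcases habin with ⟨hhit, hnomatch⟩ | ⟨hge, hltN, hseg⟩
    · -- no match: A returns -1 and L = R
      rw [hhit, if_pos rfl]
      have hLR : L = R := by
        by_contra hcon
        have hLltR : L < R := lt_of_le_of_ne hbh.1.1 hcon
        have := (hiff L hbl.1.1 (lt_of_lt_of_le hLltR hbh.1.2)).2 ⟨le_refl L, hLltR⟩
        exact hnomatch L hbl.1.1 (lt_of_lt_of_le hLltR hbh.1.2) this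
      rw [if_pos hLR]
    · -- match at hit: both sides compute the minimum of sa[L:R]
      set hit := aBin cs sa p m 0 (N - 1) with hhitdef
      have hhitne : ¬ hit = -1 := by omega
      rw [if_neg hhitne]
      have hk := (hiff hit hge hltN).1 hseg
      have hLneR : ¬ L = R := by omega
      rw [if_neg hLneR]
      rw [aDown_spec cs p sa m L R N hbl.1.1 hbh.1.2 hNle hiff (hit - 1) _ (by omega) (by omega)]
      have e1 : hit - 1 + 1 = hit := by omega
      rw [e1]
      rw [aUp_spec cs p sa m L R N N hbl.1.1 hbh.1.1 hbh.1.2 hNle rfl hiff (hit + 1) _ (by omega)]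
      set x := PySem.List.pyGetD sa hit 0 with hxdef
      set Bl := PySem.List.slice sa (some L) (some hit) with hBldef
      set C := PySem.List.slice sa (some (hit + 1)) (some R) with hCdef
      set S := PySem.List.slice sa (some L) (some R) with hSdef
      have hS : S = Bl ++ x :: C :=
        slice_decomp sa L hit R hbl.1.1 hk.1 hk.2 (le_trans hbh.1.2 hNle)
      have hyle := foldl_min_le Bl x
      have hAle := foldl_min_le C (Bl.foldl min x)
      have hmemS : C.foldl min (Bl.foldl min x) ∈ S := by
        rw [hS]
        rcases foldl_min_mem C (Bl.foldl min x) with hA | hA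
        · rw [hA]
          rcases foldl_min_mem Bl x with hy | hy
          · rw [hy]; exact List.mem_append_right _ (List.mem_cons_self)
          · exact List.mem_append_left _ hy
        · exact List.mem_append_right _ (List.mem_cons_of_mem _ hA)
      have hlbS : ∀ z ∈ S, C.foldl min (Bl.foldl min x) ≤ z := by
        intro z hz
        rw [hS] at hz
        rcases List.mem_append.1 hz with hz | hz
        · exact le_trans hAle.1 (hyle.2 z hz)
        · rcases List.mem_cons.1 hz with rfl | hz
          · exact le_trans hAle.1 hyle.1
          · exact hAle.2 z hz
      cases hmq : PySem.List.min? S (fun x => x) with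
      | none =>
        rw [PySem.List.min?_eq_none_iff] at hmq
        rw [hS] at hmq
        simp at hmq
      | some v =>
        have hvmem := PySem.List.min?_mem hmq
        have hvle := PySem.List.min?_isMin hmq
        simp only [Option.getD_some]
        exact le_antisymm (hlbS v hvmem) (hvle _ hmemS)
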